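-- pv_equiv track=rewrite | github.com/victortch/tic-tac-toe | tic_tac_toe_victor6.py | is_equivalent
-- ===== SOURCE A (Python) =====
-- def rotate_board_left(current_state):
--
--     new_state = list(current_state)
--     new_state[6] = current_state[0]
--     new_state[0] = current_state[2]
--     new_state[2] = current_state[8]
--     new_state[8] = current_state[6]
--
--     new_state[3] = current_state[1]
--     new_state[1] = current_state[5]
--     new_state[5] = current_state[7]
--     new_state[7] = current_state[3]
--
--     return new_state
--
-- def rotate_board_right(current_state):
--     new_state = list(current_state)
--     new_state[0] = current_state[6]
--     new_state[2] = current_state[0]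
--     new_state[8] = current_state[2]
--     new_state[6] = current_state[8]
--
--     new_state[1] = current_state[3]
--     new_state[5] = current_state[1]
--     new_state[7] = current_state[5]
--     new_state[3] = current_state[7]
--
--     return new_state
--
-- def board_flip(current_state):
--     new_state = list(current_state)
--     new_state[2] = current_state [0]
--     new_state[5] = current_state [3]
--     new_state[8] = current_state [6]
--
--     new_state[0] = current_state [2]
--     new_state[3] = current_state [5]
--     new_state[6] = current_state [8]
--
--     return new_state
--
-- def change_board(current_state, rotations, direction = 'left', flip = False):
--     new_state = current_state
--     rotations = rotations % 4
--     if flip: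
--         new_state = board_flip(new_state)
--     if rotations > 0:
--         if direction == 'left':
--             for i in range(rotations):
--                 new_state = rotate_board_left(new_state)
--         else:
--             for i in range(rotations):
--                 new_state = rotate_board_right(new_state)
--     return new_state
--
-- def is_equivalent(state1, state2):
--
--     equivalent = False
--     rotations = 0
--     flip = False
--
--     for i in range(4):
--         if state1 == change_board(state2, rotations=i):
--             equivalent = True
--             rotations = i
--             flip = False
--             break
--         elif state1 == change_board(state2, rotations=i, flip = True):
--             equivalent = True
--             rotations = i
--             flip = True
--             break
--         else:
--             continue
--
--     return equivalent, rotations, flip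
-- ===== SOURCE B (Python) =====
-- # Ring-based: border cells form a cyclic sequence; a left rotation is a shift by 2
-- # and the flip is a fixed reindexing, so we find each offset by one cyclic search
-- # and combine the two offsets arithmetically (first match wins, no-flip on ties).
-- _RING = (0, 1, 2, 5, 8, 7, 6, 3)  # border cells, clockwise from the top-left
--
-- def _offset(target, ring):
--     # smallest i in 0..3 with target == ring shifted left by 2*i, else 4
--     doubled = ring + ring
--     for k in range(0, 8, 2):
--         if doubled[k:k + 8] == target:
--             return k // 2
--     return 4
--
-- def is_equivalent(state1, state2):
--     if state1 == state2:
--         return True, 0, False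
--     ring2 = [state2[j] for j in _RING]
--     if len(state1) != len(state2) or state1[4] != state2[4] or state1[9:] != state2[9:]:
--         return False, 0, False
--     ring1 = [state1[j] for j in _RING]
--     flip2 = [ring2[(2 - j) % 8] for j in range(8)]
--     i_plain = _offset(ring1, ring2)
--     i_flip = _offset(ring1, flip2)
--     if i_plain <= i_flip:
--         return (True, i_plain, False) if i_plain < 4 else (False, 0, False)
--     return True, i_flip, True
-- ===== Notes on version B (the rewrite author's own statement) =====
-- stated objective: alternative
-- what changed: B re-models the board: the eight border cells form a cyclic sequence on which a left rotation is a shift by 2 and the flip is a fixed reindexing, so instead of generating candidate boards and comparing, B checks center/tail once, finds the rotation offset of the plain and the flipped ring by a cyclic sublist search each, and combines the two offsets arithmetically (smaller offset wins, no-flip on ties).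
import Mathlib
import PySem

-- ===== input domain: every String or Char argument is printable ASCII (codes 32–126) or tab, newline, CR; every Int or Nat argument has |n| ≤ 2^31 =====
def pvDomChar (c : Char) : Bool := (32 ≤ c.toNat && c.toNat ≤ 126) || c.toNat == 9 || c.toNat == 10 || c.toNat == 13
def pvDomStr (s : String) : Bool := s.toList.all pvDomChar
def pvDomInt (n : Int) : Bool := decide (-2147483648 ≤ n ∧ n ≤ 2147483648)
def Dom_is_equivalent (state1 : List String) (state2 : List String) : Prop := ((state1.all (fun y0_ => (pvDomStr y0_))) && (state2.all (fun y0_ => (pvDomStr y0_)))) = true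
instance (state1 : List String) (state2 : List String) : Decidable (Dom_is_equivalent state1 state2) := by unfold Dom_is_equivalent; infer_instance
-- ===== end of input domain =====

-- B re-models the board as a cyclic border ring (rotation = shift by 2, flip = fixed
-- reindexing): one center/tail check, two cyclic offset searches, arithmetic combine
-- (objective: alternative algorithm; same result).

-- ===== PORT A =====
-- Python list indexing/assignment at 0..8 is ported with getD/set; exact whenever the
-- list has length ≥ 9, which Pre_ guarantees on every call that reaches these helpers.
def rotate_board_left (cs : List String) : List String :=
  ((((((((cs.set 6 (cs.getD 0 "")).set 0 (cs.getD 2 "")).set 2 (cs.getD 8 "")).set 8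
      (cs.getD 6 "")).set 3 (cs.getD 1 "")).set 1 (cs.getD 5 "")).set 5
      (cs.getD 7 "")).set 7 (cs.getD 3 ""))

def rotate_board_right (cs : List String) : List String :=
  ((((((((cs.set 0 (cs.getD 6 "")).set 2 (cs.getD 0 "")).set 8 (cs.getD 2 "")).set 6
      (cs.getD 8 "")).set 1 (cs.getD 3 "")).set 5 (cs.getD 1 "")).set 7
      (cs.getD 5 "")).set 3 (cs.getD 7 ""))

def board_flip (cs : List String) : List String :=
  ((((((cs.set 2 (cs.getD 0 "")).set 5 (cs.getD 3 "")).set 8 (cs.getD 6 "")).set 0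
      (cs.getD 2 "")).set 3 (cs.getD 5 "")).set 6 (cs.getD 8 ""))

def change_board (current_state : List String) (rotations : Int)
    (direction : String) (flip : Bool) : List String :=
  let new_state := current_state
  let rotations := PySem.Int.mod rotations 4
  let new_state := if flip then board_flip new_state else new_state
  if rotations > 0 then
    if direction = "left" then
      (PySem.List.pyRange 0 rotations 1).foldl (fun s _ => rotate_board_left s) new_state
    else
      (PySem.List.pyRange 0 rotations 1).foldl (fun s _ => rotate_board_right s) new_state
  else new_state

-- the 'for i in range(4)' loop with its early break
def ieLoopA (state1 state2 : List String) : List Int → Bool × Int × Bool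
  | [] => (false, 0, false)
  | i :: rest =>
    if state1 = change_board state2 i "left" false then (true, i, false)
    else if state1 = change_board state2 i "left" true then (true, i, true)
    else ieLoopA state1 state2 rest

def is_equivalent (state1 : List String) (state2 : List String) : Bool × Int × Bool :=
  ieLoopA state1 state2 (PySem.List.pyRange 0 4 1)

-- ===== PORT B =====
-- Source B's _RING tuple of border indices
def bRingIdx : List Int := [0, 1, 2, 5, 8, 7, 6, 3]

-- Source B's _offset loop over range(0, 8, 2); slicing is exact everywhere
def bOffsetLoop (target doubled : List String) : List Int → Int
  | [] => 4
  | k :: rest =>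
    if PySem.List.slice doubled (some k) (some (k + 8)) = target then PySem.Int.floordiv k 2
    else bOffsetLoop target doubled rest

def bOffset (target ring : List String) : Int :=
  bOffsetLoop target (ring ++ ring) (PySem.List.pyRange 0 8 2)

-- Source B's indexing state[j] / ring2[(2-j)%8]: pyGet? with default "", exact since every
-- index B's code takes after the preceding checks is in range.
def is_equivalent_alt (state1 : List String) (state2 : List String) : Bool × Int × Bool :=
  if state1 = state2 then (true, 0, false)
  else
    let ring2 := bRingIdx.map (fun j => (PySem.List.pyGet? state2 j).getD "")
    if state1.length ≠ state2.length
        ∨ (PySem.List.pyGet? state1 4).getD "" ≠ (PySem.List.pyGet? state2 4).getD ""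
        ∨ PySem.List.slice state1 (some 9) none ≠ PySem.List.slice state2 (some 9) none then
      (false, 0, false)
    else
      let ring1 := bRingIdx.map (fun j => (PySem.List.pyGet? state1 j).getD "")
      let flip2 := (PySem.List.pyRange 0 8 1).map
        (fun j => (PySem.List.pyGet? ring2 (PySem.Int.mod (2 - j) 8)).getD "")
      let i_plain := bOffset ring1 ring2
      let i_flip := bOffset ring1 flip2
      if i_plain ≤ i_flip then
        (if i_plain < 4 then (true, i_plain, false) else (false, 0, false))
      else (true, i_flip, true)

-- ===== PRECONDITION & SPEC =====
-- exactly the inputs on which the Python A returns (otherwise board_flip /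
-- rotate_board_left raise IndexError)
def Pre_is_equivalent (state1 : List String) (state2 : List String) : Prop :=
  state1 = state2 ∨ 9 ≤ state2.length
instance (state1 : List String) (state2 : List String) : Decidable (Pre_is_equivalent state1 state2) := by unfold Pre_is_equivalent; infer_instance

def pvWitness_is_equivalent : List String × List String :=
  (["X", "O", " ", " ", "X", " ", " ", " ", "O"],
   ["O", " ", " ", " ", "X", " ", " ", "O", "X"])

def Spec_is_equivalent (state1 : List String) (state2 : List String) (out : Bool × Int × Bool) : Prop := out = is_equivalent_alt state1 state2
instance (state1 : List String) (state2 : List String) (out : Bool × Int × Bool) : Decidable (Spec_is_equivalent state1 state2 out) := by unfold Spec_is_equivalent; infer_instance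

-- ===== CLAIM =====
def Claim_equal_is_equivalent : Prop := ∀ (state1 : List String) (state2 : List String), Dom_is_equivalent state1 state2 → Pre_is_equivalent state1 state2 → Spec_is_equivalent state1 state2 (is_equivalent state1 state2)

-- ===== LEMMAS AND PROOFS =====

-- the common decision structure of the two programs, abstracted over the eight
-- per-candidate matching conditions and the center/tail condition C
set_option maxHeartbeats 2000000 in
theorem combineP (P0 P1 P2 P3 Q0 Q1 Q2 Q3 C : Prop)
    [Decidable P0] [Decidable P1] [Decidable P2] [Decidable P3]
    [Decidable Q0] [Decidable Q1] [Decidable Q2] [Decidable Q3] [Decidable C] :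
  (if P0 ∧ C then ((true:Bool),(0:Int),(false:Bool))
   else if Q0 ∧ C then (true,0,true)
   else if P1 ∧ C then (true,1,false)
   else if Q1 ∧ C then (true,1,true)
   else if P2 ∧ C then (true,2,false)
   else if Q2 ∧ C then (true,2,true)
   else if P3 ∧ C then (true,3,false)
   else if Q3 ∧ C then (true,3,true)
   else (false,0,false))
  =
  (if P0 ∧ C then (true,0,false)
   else if ¬C then (false,0,false)
   else
     (if (if P0 then (0:Int) else if P1 then 1 else if P2 then 2 else if P3 then 3 else 4)
        ≤ (if Q0 then (0:Int) else if Q1 then 1 else if Q2 then 2 else if Q3 then 3 else 4) then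
        (if (if P0 then (0:Int) else if P1 then 1 else if P2 then 2 else if P3 then 3 else 4) < 4 then
           (true, (if P0 then (0:Int) else if P1 then 1 else if P2 then 2 else if P3 then 3 else 4), false)
         else (false,0,false))
      else (true, (if Q0 then (0:Int) else if Q1 then 1 else if Q2 then 2 else if Q3 then 3 else 4), true))) := by
  by_cases hC : C
  · by_cases p0 : P0
    · simp [p0, hC]
    · by_cases p1 : P1 <;> by_cases p2 : P2 <;> by_cases p3 : P3 <;>
        by_cases q0 : Q0 <;> by_cases q1 : Q1 <;> by_cases q2 : Q2 <;> by_cases q3 : Q3 <;>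
        simp [p0, p1, p2, p3, q0, q1, q2, q3, hC]
  · simp [hC]

theorem pr4 : PySem.List.pyRange 0 4 1 = [0, 1, 2, 3] := by decide
theorem pr1 : PySem.List.pyRange 0 1 1 = [0] := by decide
theorem pr2 : PySem.List.pyRange 0 2 1 = [0, 1] := by decide
theorem pr3 : PySem.List.pyRange 0 3 1 = [0, 1, 2] := by decide

theorem cb0 (s : List String) (fl : Bool) :
    change_board s 0 "left" fl = (if fl then board_flip s else s) := by
  simp [change_board, PySem.Int.mod]

theorem cb1 (s : List String) (fl : Bool) :
    change_board s 1 "left" fl = rotate_board_left (if fl then board_flip s else s) := by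
  simp [change_board, PySem.Int.mod, pr1]

theorem cb2 (s : List String) (fl : Bool) :
    change_board s 2 "left" fl =
      rotate_board_left (rotate_board_left (if fl then board_flip s else s)) := by
  simp [change_board, PySem.Int.mod, pr2]

theorem cb3 (s : List String) (fl : Bool) :
    change_board s 3 "left" fl =
      rotate_board_left (rotate_board_left (rotate_board_left (if fl then board_flip s else s))) := by
  simp [change_board, PySem.Int.mod, pr3]

theorem rotL_cons (b0 b1 b2 b3 b4 b5 b6 b7 b8 : String) (t : List String) :
    rotate_board_left (b0::b1::b2::b3::b4::b5::b6::b7::b8::t)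
      = (b2::b5::b8::b1::b4::b7::b0::b3::b6::t) := rfl

theorem flip_cons (b0 b1 b2 b3 b4 b5 b6 b7 b8 : String) (t : List String) :
    board_flip (b0::b1::b2::b3::b4::b5::b6::b7::b8::t)
      = (b2::b1::b0::b5::b4::b3::b8::b7::b6::t) := rfl

-- length preservation for A's board transforms (used when len(state1) ≠ len(state2))
theorem rotL_len (s : List String) : (rotate_board_left s).length = s.length := by
  simp [rotate_board_left]

theorem flip_len (s : List String) : (board_flip s).length = s.length := by
  simp [board_flip]

theorem foldl_rotL_len (l : List Int) (s : List String) :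
    (l.foldl (fun s _ => rotate_board_left s) s).length = s.length := by
  induction l generalizing s with
  | nil => rfl
  | cons a l ih => simp [List.foldl, ih, rotL_len]

theorem cb_len (s : List String) (i : Int) (fl : Bool) :
    (change_board s i "left" fl).length = s.length := by
  simp only [change_board]
  split_ifs <;> simp [foldl_rotL_len, flip_len]

-- ring extraction on a decomposed 9+-element list
theorem ring_cons (b0 b1 b2 b3 b4 b5 b6 b7 b8 : String) (t : List String) :
    bRingIdx.map (fun j => (PySem.List.pyGet? (b0::b1::b2::b3::b4::b5::b6::b7::b8::t) j).getD "")
      = [b0,b1,b2,b5,b8,b7,b6,b3] := by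
  simp only [bRingIdx, List.map_cons, List.map_nil]
  rw [show (0:Int) = ((0:Nat):Int) from by norm_num, show (1:Int) = ((1:Nat):Int) from by norm_num,
      show (2:Int) = ((2:Nat):Int) from by norm_num, show (5:Int) = ((5:Nat):Int) from by norm_num,
      show (8:Int) = ((8:Nat):Int) from by norm_num, show (7:Int) = ((7:Nat):Int) from by norm_num,
      show (6:Int) = ((6:Nat):Int) from by norm_num, show (3:Int) = ((3:Nat):Int) from by norm_num]
  simp only [PySem.List.pyGet?_natCast]
  rfl

-- the flipped ring of a concrete 8-element ring
theorem flipRing_cons (r0 r1 r2 r3 r4 r5 r6 r7 : String) :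
    (PySem.List.pyRange 0 8 1).map
      (fun j => (PySem.List.pyGet? [r0,r1,r2,r3,r4,r5,r6,r7] (PySem.Int.mod (2 - j) 8)).getD "")
      = [r2,r1,r0,r7,r6,r5,r4,r3] := by
  rw [show PySem.List.pyRange 0 8 1 = [0,1,2,3,4,5,6,7] from by decide]
  simp only [List.map_cons, List.map_nil]
  rw [show PySem.Int.mod (2-0) 8 = ((2:Nat):Int) from by decide,
      show PySem.Int.mod (2-1) 8 = ((1:Nat):Int) from by decide,
      show PySem.Int.mod (2-2) 8 = ((0:Nat):Int) from by decide,
      show PySem.Int.mod (2-3) 8 = ((7:Nat):Int) from by decide,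
      show PySem.Int.mod (2-4) 8 = ((6:Nat):Int) from by decide,
      show PySem.Int.mod (2-5) 8 = ((5:Nat):Int) from by decide,
      show PySem.Int.mod (2-6) 8 = ((4:Nat):Int) from by decide,
      show PySem.Int.mod (2-7) 8 = ((3:Nat):Int) from by decide]
  simp only [PySem.List.pyGet?_natCast]
  rfl

-- bOffset on two concrete 8-element rings, as a 4-way if over the shift conditions
theorem bOffset_cons (t0 t1 t2 t3 t4 t5 t6 t7 r0 r1 r2 r3 r4 r5 r6 r7 : String) :
    bOffset [t0,t1,t2,t3,t4,t5,t6,t7] [r0,r1,r2,r3,r4,r5,r6,r7] =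
      (if [r0,r1,r2,r3,r4,r5,r6,r7] = [t0,t1,t2,t3,t4,t5,t6,t7] then 0
       else if [r2,r3,r4,r5,r6,r7,r0,r1] = [t0,t1,t2,t3,t4,t5,t6,t7] then 1
       else if [r4,r5,r6,r7,r0,r1,r2,r3] = [t0,t1,t2,t3,t4,t5,t6,t7] then 2
       else if [r6,r7,r0,r1,r2,r3,r4,r5] = [t0,t1,t2,t3,t4,t5,t6,t7] then 3
       else 4) := rfl

-- explicit candidate boards of A's loop on a decomposed state2
theorem c0f (b0 b1 b2 b3 b4 b5 b6 b7 b8 : String) (t : List String) :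
    change_board (b0::b1::b2::b3::b4::b5::b6::b7::b8::t) 0 "left" false
      = (b0::b1::b2::b3::b4::b5::b6::b7::b8::t) := by simp [cb0]

theorem c0t (b0 b1 b2 b3 b4 b5 b6 b7 b8 : String) (t : List String) :
    change_board (b0::b1::b2::b3::b4::b5::b6::b7::b8::t) 0 "left" true
      = (b2::b1::b0::b5::b4::b3::b8::b7::b6::t) := by simp [cb0, flip_cons]

theorem c1f (b0 b1 b2 b3 b4 b5 b6 b7 b8 : String) (t : List String) :
    change_board (b0::b1::b2::b3::b4::b5::b6::b7::b8::t) 1 "left" false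
      = (b2::b5::b8::b1::b4::b7::b0::b3::b6::t) := by simp [cb1, rotL_cons]

theorem c1t (b0 b1 b2 b3 b4 b5 b6 b7 b8 : String) (t : List String) :
    change_board (b0::b1::b2::b3::b4::b5::b6::b7::b8::t) 1 "left" true
      = (b0::b3::b6::b1::b4::b7::b2::b5::b8::t) := by simp [cb1, rotL_cons, flip_cons]

theorem c2f (b0 b1 b2 b3 b4 b5 b6 b7 b8 : String) (t : List String) :
    change_board (b0::b1::b2::b3::b4::b5::b6::b7::b8::t) 2 "left" false
      = (b8::b7::b6::b5::b4::b3::b2::b1::b0::t) := by simp [cb2, rotL_cons]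

theorem c2t (b0 b1 b2 b3 b4 b5 b6 b7 b8 : String) (t : List String) :
    change_board (b0::b1::b2::b3::b4::b5::b6::b7::b8::t) 2 "left" true
      = (b6::b7::b8::b3::b4::b5::b0::b1::b2::t) := by simp [cb2, rotL_cons, flip_cons]

theorem c3f (b0 b1 b2 b3 b4 b5 b6 b7 b8 : String) (t : List String) :
    change_board (b0::b1::b2::b3::b4::b5::b6::b7::b8::t) 3 "left" false
      = (b6::b3::b0::b7::b4::b1::b8::b5::b2::t) := by simp [cb3, rotL_cons]

theorem c3t (b0 b1 b2 b3 b4 b5 b6 b7 b8 : String) (t : List String) :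
    change_board (b0::b1::b2::b3::b4::b5::b6::b7::b8::t) 3 "left" true
      = (b8::b5::b2::b7::b4::b1::b6::b3::b0::t) := by simp [cb3, rotL_cons, flip_cons]

-- slices used by B on decomposed lists
theorem get4 (x0 x1 x2 x3 x4 : String) (u : List String) :
    (PySem.List.pyGet? (x0::x1::x2::x3::x4::u) 4).getD "" = x4 := by
  rw [show (4:Int) = ((4:Nat):Int) from by norm_num, PySem.List.pyGet?_natCast]
  rfl

theorem slice9 (x0 x1 x2 x3 x4 x5 x6 x7 x8 : String) (u : List String) :
    PySem.List.slice (x0::x1::x2::x3::x4::x5::x6::x7::x8::u) (some 9) none = u := by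
  rw [show (9:Int) = ((9:Nat):Int) from by norm_num, PySem.List.slice_from_natCast]
  rfl

theorem main_cons (a0 a1 a2 a3 a4 a5 a6 a7 a8 : String) (s : List String)
    (b0 b1 b2 b3 b4 b5 b6 b7 b8 : String) (t : List String) :
    is_equivalent (a0::a1::a2::a3::a4::a5::a6::a7::a8::s) (b0::b1::b2::b3::b4::b5::b6::b7::b8::t)
      = is_equivalent_alt (a0::a1::a2::a3::a4::a5::a6::a7::a8::s) (b0::b1::b2::b3::b4::b5::b6::b7::b8::t) := by
  have hE0 : ((a0::a1::a2::a3::a4::a5::a6::a7::a8::s) = (b0::b1::b2::b3::b4::b5::b6::b7::b8::t))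
      ↔ ((([b0,b1,b2,b5,b8,b7,b6,b3] : List String) = [a0,a1,a2,a5,a8,a7,a6,a3]) ∧ (a4 = b4 ∧ s = t)) := by
    constructor <;> intro h <;> simp_all
  have hF0 : ((a0::a1::a2::a3::a4::a5::a6::a7::a8::s) = (b2::b1::b0::b5::b4::b3::b8::b7::b6::t))
      ↔ ((([b2,b1,b0,b3,b6,b7,b8,b5] : List String) = [a0,a1,a2,a5,a8,a7,a6,a3]) ∧ (a4 = b4 ∧ s = t)) := by
    constructor <;> intro h <;> simp_all
  have hE1 : ((a0::a1::a2::a3::a4::a5::a6::a7::a8::s) = (b2::b5::b8::b1::b4::b7::b0::b3::b6::t))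
      ↔ ((([b2,b5,b8,b7,b6,b3,b0,b1] : List String) = [a0,a1,a2,a5,a8,a7,a6,a3]) ∧ (a4 = b4 ∧ s = t)) := by
    constructor <;> intro h <;> simp_all
  have hF1 : ((a0::a1::a2::a3::a4::a5::a6::a7::a8::s) = (b0::b3::b6::b1::b4::b7::b2::b5::b8::t))
      ↔ ((([b0,b3,b6,b7,b8,b5,b2,b1] : List String) = [a0,a1,a2,a5,a8,a7,a6,a3]) ∧ (a4 = b4 ∧ s = t)) := by
    constructor <;> intro h <;> simp_all
  have hE2 : ((a0::a1::a2::a3::a4::a5::a6::a7::a8::s) = (b8::b7::b6::b5::b4::b3::b2::b1::b0::t))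
      ↔ ((([b8,b7,b6,b3,b0,b1,b2,b5] : List String) = [a0,a1,a2,a5,a8,a7,a6,a3]) ∧ (a4 = b4 ∧ s = t)) := by
    constructor <;> intro h <;> simp_all
  have hF2 : ((a0::a1::a2::a3::a4::a5::a6::a7::a8::s) = (b6::b7::b8::b3::b4::b5::b0::b1::b2::t))
      ↔ ((([b6,b7,b8,b5,b2,b1,b0,b3] : List String) = [a0,a1,a2,a5,a8,a7,a6,a3]) ∧ (a4 = b4 ∧ s = t)) := by
    constructor <;> intro h <;> simp_all
  have hE3 : ((a0::a1::a2::a3::a4::a5::a6::a7::a8::s) = (b6::b3::b0::b7::b4::b1::b8::b5::b2::t))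
      ↔ ((([b6,b3,b0,b1,b2,b5,b8,b7] : List String) = [a0,a1,a2,a5,a8,a7,a6,a3]) ∧ (a4 = b4 ∧ s = t)) := by
    constructor <;> intro h <;> simp_all
  have hF3 : ((a0::a1::a2::a3::a4::a5::a6::a7::a8::s) = (b8::b5::b2::b7::b4::b1::b6::b3::b0::t))
      ↔ ((([b8,b5,b2,b1,b0,b3,b6,b7] : List String) = [a0,a1,a2,a5,a8,a7,a6,a3]) ∧ (a4 = b4 ∧ s = t)) := by
    constructor <;> intro h <;> simp_all
  have hlen : (((a0::a1::a2::a3::a4::a5::a6::a7::a8::s).length ≠ (b0::b1::b2::b3::b4::b5::b6::b7::b8::t).length)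
        ∨ (a4 ≠ b4) ∨ (s ≠ t))
      ↔ ¬(a4 = b4 ∧ s = t) := by
    constructor
    · rintro (h | h | h) ⟨h4, hst⟩ <;> simp_all
    · intro h
      rcases not_and_or.mp h with h4 | hst
      · exact Or.inr (Or.inl h4)
      · exact Or.inr (Or.inr hst)
  simp only [is_equivalent, is_equivalent_alt, pr4, ieLoopA,
    c0f, c0t, c1f, c1t, c2f, c2t, c3f, c3t,
    get4, slice9, ring_cons, flipRing_cons, bOffset_cons,
    hE0, hF0, hE1, hF1, hE2, hF2, hE3, hF3, hlen]
  exact combineP _ _ _ _ _ _ _ _ _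

-- any list of length ≥ 9 decomposes into nine heads and a tail
theorem exists9 (l : List String) (h : 9 ≤ l.length) :
    ∃ x0 x1 x2 x3 x4 x5 x6 x7 x8 u, l = x0::x1::x2::x3::x4::x5::x6::x7::x8::u := by
  rcases l with _|⟨x0,l⟩; · simp at h
  rcases l with _|⟨x1,l⟩; · simp at h
  rcases l with _|⟨x2,l⟩; · simp at h
  rcases l with _|⟨x3,l⟩; · simp at h
  rcases l with _|⟨x4,l⟩; · simp at h
  rcases l with _|⟨x5,l⟩; · simp at h
  rcases l with _|⟨x6,l⟩; · simp at h
  rcases l with _|⟨x7,l⟩; · simp at h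
  rcases l with _|⟨x8,l⟩; · simp at h
  exact ⟨x0, x1, x2, x3, x4, x5, x6, x7, x8, l, rfl⟩

-- ===== VERDICT =====
theorem is_equivalent_spec : Claim_equal_is_equivalent := by
  intro s1 s2 _ hpre
  unfold Spec_is_equivalent
  rcases hpre with heq | hlen9
  · subst heq
    have hA : is_equivalent s1 s1 = (true, 0, false) := by
      unfold is_equivalent
      rw [pr4]
      simp [ieLoopA, cb0]
    have hB : is_equivalent_alt s1 s1 = (true, 0, false) := by
      unfold is_equivalent_alt
      simp
    rw [hA, hB]
  · by_cases hL : s1.length = s2.length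
    · obtain ⟨b0,b1,b2,b3,b4,b5,b6,b7,b8,t, rfl⟩ := exists9 s2 hlen9
      obtain ⟨a0,a1,a2,a3,a4,a5,a6,a7,a8,s, rfl⟩ := exists9 s1 (by omega)
      exact main_cons a0 a1 a2 a3 a4 a5 a6 a7 a8 s b0 b1 b2 b3 b4 b5 b6 b7 b8 t
    · have hne : ∀ (i : Int) (fl : Bool), ¬ s1 = change_board s2 i "left" fl := by
        intro i fl h
        exact hL (by rw [h, cb_len])
      have hA : is_equivalent s1 s2 = (false, 0, false) := by
        unfold is_equivalent
        rw [pr4]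
        simp [ieLoopA, hne]
      have hB : is_equivalent_alt s1 s2 = (false, 0, false) := by
        simp only [is_equivalent_alt]
        rw [if_neg (fun h => hL (by rw [h])), if_pos (Or.inl hL)]
      rw [hA, hB]
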